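-- pv_equiv track=rewrite | github.com/H0R4T1U/LabRez | test01.py | ii_palindrom_prim
-- ===== SOURCE A (Python) =====
-- def is_prime(num):
--     for i in range(2, num):
--         if num % i == 0:
--             return False
--     return True
--
-- def ii_palindrom_prim(x):
--     x = str(abs(int(x)))
--     a = []
--     b = []
--     for i in range(len(x)):
--         if is_prime(int(x[i])):
--             a.append(x[i])
--         else:
--             break
--     for i in range(len(x) - 1, -1, -1):
--         if is_prime(int(x[i])):
--             b.append(x[i])
--         else:
--             break
--
--     if a == b:
--         return True
--     else:
--         return False
-- ===== SOURCE B (Python) =====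
-- def is_prime(num):
--     for i in range(2, num):
--         if num % i == 0:
--             return False
--     return True
--
-- def _scan(s):
--     # two-pointer by recursion: compare outermost pair, shrink to the middle
--     if len(s) < 2:
--         return True
--     first, last = s[0], s[-1]
--     pf, pl = is_prime(int(first)), is_prime(int(last))
--     if not pf and not pl:
--         return True
--     if pf != pl or first != last:
--         return False
--     return _scan(s[1:-1])
--
-- def ii_palindrom_prim(x):
--     return _scan(str(abs(int(x))))
-- ===== Notes on version B (the rewrite author's own statement) =====
-- stated objective: alternative
-- what changed: Replaced A's two full run-building loops (leading prime-digit run, reversed trailing prime-digit run) plus list-equality comparison with a single short-circuiting two-pointer scan that compares the outermost character pair and recurses on the middle slice.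
import Mathlib
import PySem

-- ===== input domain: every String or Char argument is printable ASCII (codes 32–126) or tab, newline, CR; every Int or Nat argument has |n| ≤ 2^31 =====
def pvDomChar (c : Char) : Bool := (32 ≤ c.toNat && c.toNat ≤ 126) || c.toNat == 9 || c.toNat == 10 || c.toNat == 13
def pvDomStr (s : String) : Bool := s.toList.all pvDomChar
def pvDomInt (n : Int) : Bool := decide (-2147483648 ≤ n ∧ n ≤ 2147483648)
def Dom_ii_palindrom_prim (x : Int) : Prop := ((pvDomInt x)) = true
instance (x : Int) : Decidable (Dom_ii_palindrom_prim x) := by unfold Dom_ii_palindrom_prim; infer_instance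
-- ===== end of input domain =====

-- B replaces A's two full run-building loops + list equality by one short-circuiting
-- two-pointer scan (recursing on the middle slice); objective: alternative/simpler.

-- ===== PORT A =====

-- is_prime: for i in range(2, num): if num % i == 0: return False; return True
def pvIsPrime (num : Int) : Bool :=
  (PySem.List.pyRange 2 num 1).all (fun i => !(PySem.Int.mod num i == 0))

-- int(c) for a single digit char; exact on digit chars, the only chars str(abs(int(x))) contains
def pvDigit (c : Char) : Int := (c.toNat : Int) - 48

-- first loop of A: walk forward appending while is_prime(int(x[i])), break otherwise
def pvRunA (cs : List Char) : List Char :=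
  match cs with
  | [] => []
  | c :: rest => if pvIsPrime (pvDigit c) then c :: pvRunA rest else []

def ii_palindrom_prim (x : Int) : Bool :=
  let cs := (PySem.Int.toStr (|x|)).toList
  let a := pvRunA cs
  -- second loop: i from len-1 down to 0, i.e. the same run-building walk over the reversed chars
  let b := pvRunA cs.reverse
  if a == b then true else false

-- ===== PORT B =====

-- _scan: compare outermost pair (s[0], s[-1]); s[-1]/s[1:-1] via getLastD/dropLast (list nonempty here)
def pvScanB (cs : List Char) : Bool :=
  match cs with
  | [] => true
  | [_] => true
  | c :: d :: rest =>
    let t := d :: rest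
    let l := t.getLastD ' '
    let pf := pvIsPrime (pvDigit c)
    let pl := pvIsPrime (pvDigit l)
    if !pf && !pl then true
    else if (pf != pl) || (c != l) then false
    else pvScanB t.dropLast
termination_by cs.length
decreasing_by simp

def ii_palindrom_prim_alt (x : Int) : Bool :=
  pvScanB (PySem.Int.toStr (|x|)).toList

-- ===== PRECONDITION & SPEC =====
def Spec_ii_palindrom_prim (x : Int) (out : Bool) : Prop := out = ii_palindrom_prim_alt x
instance (x : Int) (out : Bool) : Decidable (Spec_ii_palindrom_prim x out) := by unfold Spec_ii_palindrom_prim; infer_instance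

-- ===== CLAIM (what is proved, stated in full; the proofs are below) =====
def Claim_equal_ii_palindrom_prim : Prop := ∀ (x : Int), Dom_ii_palindrom_prim x → Spec_ii_palindrom_prim x (ii_palindrom_prim x)

-- ===== LEMMAS AND PROOFS =====

theorem pvRunA_eq_takeWhile (cs : List Char) :
    pvRunA cs = cs.takeWhile (fun c => pvIsPrime (pvDigit c)) := by
  induction cs with
  | nil => rfl
  | cons c rest ih => simp [pvRunA, List.takeWhile_cons, ih]

theorem pvScanB_concat (c l : Char) (mid : List Char) :
    pvScanB (c :: (mid ++ [l])) =
      (if !pvIsPrime (pvDigit c) && !pvIsPrime (pvDigit l) then true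
       else if (pvIsPrime (pvDigit c) != pvIsPrime (pvDigit l)) || (c != l) then false
       else pvScanB mid) := by
  cases mid with
  | nil => simp [pvScanB]
  | cons m ms =>
    have h1 : (m :: (ms ++ [l])).getLast?.getD ' ' = l := by
      rw [show m :: (ms ++ [l]) = (m :: ms) ++ [l] from by simp, List.getLast?_concat]
      rfl
    have h2 : (m :: (ms ++ [l])).dropLast = m :: ms := by
      rw [show m :: (ms ++ [l]) = (m :: ms) ++ [l] from by simp, List.dropLast_concat]
    simp [pvScanB, h1, h2]

theorem core (n : Nat) : ∀ cs : List Char, cs.length ≤ n →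
    ((pvRunA cs == pvRunA cs.reverse) = pvScanB cs) := by
  induction n with
  | zero =>
    intro cs h
    have : cs = [] := List.eq_nil_of_length_eq_zero (Nat.le_zero.mp h)
    subst this; simp [pvRunA, pvScanB]
  | succ n ih =>
    intro cs h
    match cs with
    | [] => simp [pvRunA, pvScanB]
    | [c] =>
      by_cases hp : pvIsPrime (pvDigit c) = true <;> simp [pvRunA, pvScanB, hp]
    | c :: d :: rest =>
      obtain ⟨mid, l, hml⟩ : ∃ mid l, d :: rest = mid ++ [l] := by
        rcases List.eq_nil_or_concat (d :: rest) with h' | ⟨mid, l, h'⟩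
        · simp at h'
        · exact ⟨mid, l, by simpa [List.concat_eq_append] using h'⟩
      have hlen : mid.length ≤ n := by
        have h1 := congrArg List.length hml
        have h2 : (c :: d :: rest).length ≤ n + 1 := h
        simp at h1 h2
        omega
      rw [hml, pvScanB_concat]
      have hrev : (c :: (mid ++ [l])).reverse = l :: (mid.reverse ++ [c]) := by simp
      rw [hrev]
      by_cases pc : pvIsPrime (pvDigit c) = true
        <;> by_cases pl : pvIsPrime (pvDigit l) = true
      · -- both prime
        by_cases hcl : c = l
        · subst hcl
          have hRHS : (if !pvIsPrime (pvDigit c) && !pvIsPrime (pvDigit c) then true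
              else if (pvIsPrime (pvDigit c) != pvIsPrime (pvDigit c)) || (c != c) then false
              else pvScanB mid) = pvScanB mid := by simp [pc]
          rw [hRHS, ← ih mid hlen]
          simp only [pvRunA, pc, if_true, List.cons_beq_cons, BEq.rfl, Bool.true_and]
          rw [pvRunA_eq_takeWhile, pvRunA_eq_takeWhile, pvRunA_eq_takeWhile, pvRunA_eq_takeWhile]
          by_cases hall : ∀ z ∈ mid, pvIsPrime (pvDigit z) = true
          · have hall' : ∀ z ∈ mid.reverse, pvIsPrime (pvDigit z) = true := by
              simpa using hall
            have e1 : mid.takeWhile (fun z => pvIsPrime (pvDigit z)) = mid :=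
              List.takeWhile_eq_self_iff.mpr hall
            have e2 : mid.reverse.takeWhile (fun z => pvIsPrime (pvDigit z)) = mid.reverse :=
              List.takeWhile_eq_self_iff.mpr hall'
            rw [List.takeWhile_append, List.takeWhile_append, e1, e2, if_pos rfl, if_pos rfl,
                show List.takeWhile (fun z => pvIsPrime (pvDigit z)) [c] = [c] from by
                  simp [pc]]
            rw [Bool.eq_iff_iff]
            simp [beq_iff_eq]
          · have hall' : ¬ ∀ z ∈ mid.reverse, pvIsPrime (pvDigit z) = true := by
              simpa using hall
            have hne : ¬ (mid.takeWhile (fun z => pvIsPrime (pvDigit z))).length = mid.length := by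
              intro hl
              exact hall (List.takeWhile_eq_self_iff.mp
                ((List.takeWhile_prefix _).eq_of_length hl))
            have hne' : ¬ (mid.reverse.takeWhile (fun z => pvIsPrime (pvDigit z))).length = mid.reverse.length := by
              intro hl
              exact hall' (List.takeWhile_eq_self_iff.mp
                ((List.takeWhile_prefix _).eq_of_length hl))
            rw [List.takeWhile_append, if_neg hne, List.takeWhile_append, if_neg hne']
        · -- both prime, c ≠ l: heads differ
          simp [pvRunA, pc, pl, hcl, List.cons_beq_cons, bne]
      · -- pc true, pl false
        simp [pvRunA, pc, pl, bne]
      · -- pc false, pl true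
        simp [pvRunA, pc, pl, bne]
      · -- neither prime
        simp [pvRunA, pc, pl]

theorem ii_palindrom_prim_spec' (x : Int) :
    ii_palindrom_prim x = ii_palindrom_prim_alt x := by
  unfold ii_palindrom_prim ii_palindrom_prim_alt
  have := core ((PySem.Int.toStr (|x|)).toList.length) ((PySem.Int.toStr (|x|)).toList) le_rfl
  simp only [← this]
  split <;> simp_all

-- ===== VERDICT (by name: the statement is the Claim_ definition above) =====
theorem ii_palindrom_prim_spec : Claim_equal_ii_palindrom_prim := by
  intro x _
  unfold Spec_ii_palindrom_prim
  exact ii_palindrom_prim_spec' x
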